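-- pv_equiv track=rewrite | github.com/Aslan-JSONist/mipt_homeworks_2026 | Part_3_Types_Conditions_Loops_Functions/hw3.py | get_cost_stats
-- ===== SOURCE A (Python) =====
-- DateTuple = tuple[int, int, int]
--
-- CostEntry = tuple[str, int, DateTuple]
--
-- CostStats = tuple[int, int, dict[str, int]]
--
-- def get_cost_stats(costs: list[CostEntry], stats_date: DateTuple) -> CostStats:
--     capital_cost = 0
--     month_cost = 0
--     category_totals: dict[str, int] = {}
--
--     for cost_entry in costs:
--         if is_not_later(get_cost_date(cost_entry), stats_date):
--             capital_cost += get_cost_amount(cost_entry)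
--             if is_same_month(get_cost_date(cost_entry), stats_date):
--                 month_cost += get_cost_amount(cost_entry)
--                 save_category_total(
--                     category_totals,
--                     get_cost_category(cost_entry),
--                     get_cost_amount(cost_entry),
--                 )
--     return capital_cost, month_cost, category_totals
--
-- def get_cost_category(cost_entry: CostEntry) -> str:
--     return cost_entry[0]
--
-- def get_cost_amount(cost_entry: CostEntry) -> int:
--     return cost_entry[1]
--
-- def get_cost_date(cost_entry: CostEntry) -> DateTuple:
--     return cost_entry[2]
--
-- def save_category_total(category_totals: dict[str, int], category_name: str, amount: int) -> None:
--     current_total = category_totals.get(category_name, 0)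
--     category_totals[category_name] = current_total + amount
--
-- def is_same_month(first_date: DateTuple, second_date: DateTuple) -> bool:
--     return get_month_key(first_date) == get_month_key(second_date)
--
-- def get_month_key(date_tuple: DateTuple) -> tuple[int, int]:
--     return date_tuple[1], date_tuple[2]
--
-- def is_not_later(left_date: DateTuple, right_date: DateTuple) -> bool:
--     return get_date_key(left_date) <= get_date_key(right_date)
--
-- def get_date_key(date_tuple: DateTuple) -> tuple[int, int, int]:
--     day, month, year = date_tuple
--     return year, month, day
-- ===== SOURCE B (Python) =====
-- def get_cost_stats(costs, stats_date):
--     day, month, year = stats_date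
--     eligible = [c for c in costs
--                 if (c[2][2], c[2][1], c[2][0]) <= (year, month, day)]
--     capital_cost = sum(c[1] for c in eligible)
--     month_entries = [c for c in eligible if (c[2][1], c[2][2]) == (month, year)]
--     month_cost = sum(c[1] for c in month_entries)
--     category_totals = {}
--     for category, amount, _ in month_entries:
--         category_totals[category] = category_totals.get(category, 0) + amount
--     return capital_cost, month_cost, category_totals
-- ===== Notes on version B (the rewrite author's own statement) =====
-- stated objective: simpler
-- what changed: Replaces A's single accumulating loop with its helper-function zoo by a filter-then-aggregate decomposition: build the eligible list, sum it, derive the same-month sublist, sum it, and fold only that sublist into the category dict.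
import Mathlib
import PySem

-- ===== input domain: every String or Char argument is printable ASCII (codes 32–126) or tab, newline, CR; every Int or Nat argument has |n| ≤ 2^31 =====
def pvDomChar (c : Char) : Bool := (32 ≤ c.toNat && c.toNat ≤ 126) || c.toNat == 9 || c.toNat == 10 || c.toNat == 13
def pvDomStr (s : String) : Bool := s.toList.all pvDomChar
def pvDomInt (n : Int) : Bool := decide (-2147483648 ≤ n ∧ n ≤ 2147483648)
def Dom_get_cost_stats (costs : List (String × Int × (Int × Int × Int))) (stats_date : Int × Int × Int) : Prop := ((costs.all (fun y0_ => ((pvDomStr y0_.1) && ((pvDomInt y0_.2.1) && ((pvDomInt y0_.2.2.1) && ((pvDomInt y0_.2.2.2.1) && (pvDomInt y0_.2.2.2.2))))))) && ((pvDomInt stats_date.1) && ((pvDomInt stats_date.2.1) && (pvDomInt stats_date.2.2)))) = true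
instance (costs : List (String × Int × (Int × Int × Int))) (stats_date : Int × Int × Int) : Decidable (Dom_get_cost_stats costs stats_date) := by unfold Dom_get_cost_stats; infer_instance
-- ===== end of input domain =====

-- B replaces A's single accumulating loop (with helper functions) by a filter-then-aggregate
-- decomposition over the same list; objective: simpler, same cost.

-- ===== PORT A =====
-- helpers transliterate A's module helpers; Python tuple <= is lexicographic, written out by hand (exact)
def pvA_get_date_key (dt : Int × Int × Int) : Int × Int × Int := (dt.2.2, dt.2.1, dt.1)

def pvA_tupLe (a b : Int × Int × Int) : Bool :=
  decide (a.1 < b.1) || (a.1 == b.1 && (decide (a.2.1 < b.2.1) || (a.2.1 == b.2.1 && decide (a.2.2 ≤ b.2.2))))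

def pvA_is_not_later (l r : Int × Int × Int) : Bool := pvA_tupLe (pvA_get_date_key l) (pvA_get_date_key r)

def pvA_get_month_key (dt : Int × Int × Int) : Int × Int := (dt.2.1, dt.2.2)

def pvA_is_same_month (f s : Int × Int × Int) : Bool := pvA_get_month_key f == pvA_get_month_key s

def pvA_save_category_total (d : PySem.Dict String Int) (k : String) (amt : Int) : PySem.Dict String Int :=
  d.insert k (d.getD k 0 + amt)

def get_cost_stats (costs : List (String × Int × (Int × Int × Int))) (stats_date : Int × Int × Int) : Int × Int × (List (String × Int)) :=
  let r := costs.foldl (fun st cost_entry =>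
      if pvA_is_not_later cost_entry.2.2 stats_date then
        let cap := st.1 + cost_entry.2.1
        if pvA_is_same_month cost_entry.2.2 stats_date then
          (cap, st.2.1 + cost_entry.2.1, pvA_save_category_total st.2.2 cost_entry.1 cost_entry.2.1)
        else (cap, st.2.1, st.2.2)
      else st)
    ((0 : Int), (0 : Int), (PySem.Dict.empty : PySem.Dict String Int))
  (r.1, r.2.1, r.2.2.items)

-- ===== PORT B =====
-- B's inline tuple comparison (Python lexicographic <=, written out by hand; exact)
def pvB_keyLe (a b : Int × Int × Int) : Bool :=
  decide (a.1 < b.1) || (a.1 == b.1 && (decide (a.2.1 < b.2.1) || (a.2.1 == b.2.1 && decide (a.2.2 ≤ b.2.2))))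

def get_cost_stats_alt (costs : List (String × Int × (Int × Int × Int))) (stats_date : Int × Int × Int) : Int × Int × (List (String × Int)) :=
  let day := stats_date.1
  let month := stats_date.2.1
  let year := stats_date.2.2
  let eligible := costs.filter (fun c => pvB_keyLe (c.2.2.2.2, c.2.2.2.1, c.2.2.1) (year, month, day))
  let capital_cost := (eligible.map (fun c => c.2.1)).sum
  let month_entries := eligible.filter (fun c => (c.2.2.2.1, c.2.2.2.2) == (month, year))
  let month_cost := (month_entries.map (fun c => c.2.1)).sum
  let category_totals := month_entries.foldl
      (fun t c => t.insert c.1 (t.getD c.1 0 + c.2.1))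
      (PySem.Dict.empty : PySem.Dict String Int)
  (capital_cost, month_cost, category_totals.items)

-- ===== PRECONDITION & SPEC =====
def Spec_get_cost_stats (costs : List (String × Int × (Int × Int × Int))) (stats_date : Int × Int × Int) (out : Int × Int × (List (String × Int))) : Prop := out = get_cost_stats_alt costs stats_date
instance (costs : List (String × Int × (Int × Int × Int))) (stats_date : Int × Int × Int) (out : Int × Int × (List (String × Int))) : Decidable (Spec_get_cost_stats costs stats_date out) := by unfold Spec_get_cost_stats; infer_instance

-- ===== CLAIM (what is proved, stated in full; the proofs are below) =====
def Claim_equal_get_cost_stats : Prop := ∀ (costs : List (String × Int × (Int × Int × Int))) (stats_date : Int × Int × Int), Dom_get_cost_stats costs stats_date → Spec_get_cost_stats costs stats_date (get_cost_stats costs stats_date)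

-- ===== LEMMAS AND PROOFS =====

-- A's loop, with generalized accumulators, equals B's filter-then-aggregate triple.
theorem pv_loop_eq (sd : Int × Int × Int) :
    ∀ (l : List (String × Int × (Int × Int × Int))) (cap mon : Int) (t : PySem.Dict String Int),
    l.foldl (fun st cost_entry =>
        if pvA_is_not_later cost_entry.2.2 sd then
          let c := st.1 + cost_entry.2.1
          if pvA_is_same_month cost_entry.2.2 sd then
            (c, st.2.1 + cost_entry.2.1, pvA_save_category_total st.2.2 cost_entry.1 cost_entry.2.1)
          else (c, st.2.1, st.2.2)
        else st) (cap, mon, t) =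
      (cap + (((l.filter (fun c => pvB_keyLe (c.2.2.2.2, c.2.2.2.1, c.2.2.1) (sd.2.2, sd.2.1, sd.1))).map (fun c => c.2.1)).sum),
       mon + ((((l.filter (fun c => pvB_keyLe (c.2.2.2.2, c.2.2.2.1, c.2.2.1) (sd.2.2, sd.2.1, sd.1))).filter (fun c => (c.2.2.2.1, c.2.2.2.2) == (sd.2.1, sd.2.2))).map (fun c => c.2.1)).sum),
       ((l.filter (fun c => pvB_keyLe (c.2.2.2.2, c.2.2.2.1, c.2.2.1) (sd.2.2, sd.2.1, sd.1))).filter (fun c => (c.2.2.2.1, c.2.2.2.2) == (sd.2.1, sd.2.2))).foldl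
         (fun t c => t.insert c.1 (t.getD c.1 0 + c.2.1)) t) := by
  intro l
  induction l with
  | nil => intro cap mon t; simp
  | cons c l ih =>
    intro cap mon t
    have hP : pvA_is_not_later c.2.2 sd = pvB_keyLe (c.2.2.2.2, c.2.2.2.1, c.2.2.1) (sd.2.2, sd.2.1, sd.1) := rfl
    have hQ : pvA_is_same_month c.2.2 sd = ((c.2.2.2.1, c.2.2.2.2) == (sd.2.1, sd.2.2)) := rfl
    by_cases hp : pvB_keyLe (c.2.2.2.2, c.2.2.2.1, c.2.2.1) (sd.2.2, sd.2.1, sd.1) = true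
    · by_cases hq : ((c.2.2.2.1, c.2.2.2.2) == (sd.2.1, sd.2.2)) = true
      · simp only [List.foldl_cons, List.filter_cons, hP, hQ, hp, hq, if_pos]
        rw [ih]
        simp [pvA_save_category_total]
        constructor <;> ring
      · simp only [List.foldl_cons, List.filter_cons, hP, hQ, hp, hq, if_pos]
        simp only [Bool.false_eq_true, if_false]
        rw [ih]
        simp
        ring
    · simp only [List.foldl_cons, List.filter_cons, hP, hp]
      simp only [Bool.false_eq_true, if_false]
      exact ih cap mon t

-- ===== VERDICT (by name: the statement is the Claim_ definition above) =====
theorem get_cost_stats_spec : Claim_equal_get_cost_stats := by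
  intro costs sd _
  unfold Spec_get_cost_stats get_cost_stats get_cost_stats_alt
  rw [pv_loop_eq sd costs 0 0 PySem.Dict.empty]
  simp
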